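-- pv_equiv track=rewrite | github.com/jalphad/4colorthm | app.py | compute_kempe_sectors
-- ===== SOURCE A (Python) =====
-- def compute_kempe_sectors(coloring: dict, pairing: tuple):
--     sectors = []
--     previous = -1
--     # As byproduct of other code / way rings are in conf file, consecutive nodes in for loop are neighbours in ring
--     # TODO: For rigorousness and stability maybe sort this first per key?
--     for k, v in coloring.items():
--         if v in pairing[0]:
--             if previous == 0:
--                 sectors[-1].append(k)
--             else:
--                 sectors.append([k])
--             previous = 0
--         elif v in pairing[1]:
--             if previous == 1:
--                 sectors[-1].append(k)
--             else:
--                 sectors.append([k])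
--             previous = 1
--         else:
--             raise Exception("Color not in any pair!")
--     # Merge if first and last are actually same
--     if ((coloring[sectors[0][0]] in pairing[0] and coloring[sectors[-1][0]] in pairing[0]) or
--             (coloring[sectors[0][0]] in pairing[1] and coloring[sectors[-1][0]] in pairing[1])):
--         if sectors[0] != sectors[-1]:
--             sectors[0] += sectors[-1]
--             sectors.pop(-1)
--
--     return sectors
-- ===== SOURCE B (Python) =====
-- def compute_kempe_sectors(coloring: dict, pairing: tuple):
--     # Label every node with its pair index, then slice the key sequence into
--     # maximal equal-label runs with a two-pointer scan; finally do the circular merge.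
--     def lab(v):
--         if v in pairing[0]:
--             return 0
--         if v in pairing[1]:
--             return 1
--         raise Exception("Color not in any pair!")
--     pairs = [(k, lab(v)) for k, v in coloring.items()]
--     sectors = []
--     i = 0
--     n = len(pairs)
--     while i < n:
--         j = i + 1
--         while j < n and pairs[j][1] == pairs[i][1]:
--             j += 1
--         sectors.append([k for k, _ in pairs[i:j]])
--         i = j
--     v0 = coloring[sectors[0][0]]
--     vl = coloring[sectors[-1][0]]
--     if (v0 in pairing[0] and vl in pairing[0]) or (v0 in pairing[1] and vl in pairing[1]):
--         if sectors[0] != sectors[-1]: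
--             sectors[0] = sectors[0] + sectors[-1]
--             sectors.pop()
--     return sectors
-- ===== Notes on version B (the rewrite author's own statement) =====
-- stated objective: alternative
-- what changed: B precomputes a pair-index label for every node and slices the key sequence into maximal equal-label runs with a two-pointer scan, instead of A's stateful previous-flag loop that appends into the last sector in place.
-- outside the precondition, e.g. on compute_kempe_sectors({1: 5}, ([6], [7])): A raises Exception, B raises Exception; on compute_kempe_sectors({}, ([5], [6])): A raises IndexError, B raises IndexError
import Mathlib
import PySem

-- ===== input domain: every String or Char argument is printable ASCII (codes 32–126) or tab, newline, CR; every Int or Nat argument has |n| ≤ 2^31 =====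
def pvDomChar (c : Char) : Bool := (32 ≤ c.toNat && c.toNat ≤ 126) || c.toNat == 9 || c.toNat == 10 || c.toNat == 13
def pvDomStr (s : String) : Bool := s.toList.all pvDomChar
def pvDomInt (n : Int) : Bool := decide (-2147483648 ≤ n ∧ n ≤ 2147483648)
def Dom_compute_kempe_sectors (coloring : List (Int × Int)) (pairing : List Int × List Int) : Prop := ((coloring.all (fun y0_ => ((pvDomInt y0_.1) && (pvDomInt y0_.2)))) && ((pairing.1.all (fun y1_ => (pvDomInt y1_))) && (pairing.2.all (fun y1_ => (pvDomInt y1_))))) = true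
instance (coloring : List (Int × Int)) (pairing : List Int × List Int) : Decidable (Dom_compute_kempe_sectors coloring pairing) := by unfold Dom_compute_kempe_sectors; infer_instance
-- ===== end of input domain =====

-- B groups the ring nodes by precomputing a pair-index label per node and slicing the key
-- sequence into maximal equal-label runs (two-pointer scan), instead of A's stateful
-- previous-flag loop appending into the last sector; objective: alternative decomposition.

-- ===== PORT A =====
-- dict lookup coloring[k]: first match in the association list (Pre_ keys are distinct)
def pvLookup (coloring : List (Int × Int)) (k : Int) : Int :=
  ((coloring.find? (fun kv => kv.1 == k)).map Prod.snd).getD 0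

-- one iteration of A's for loop over (k, v); the final 'else' is Python's raise, excluded by Pre_
def kempeStepA (pairing : List Int × List Int) (st : List (List Int) × Int) (kv : Int × Int) :
    List (List Int) × Int :=
  if kv.2 ∈ pairing.1 then
    (if st.2 = 0 then st.1.dropLast ++ [st.1.getLastD [] ++ [kv.1]] else st.1 ++ [[kv.1]], 0)
  else if kv.2 ∈ pairing.2 then
    (if st.2 = 1 then st.1.dropLast ++ [st.1.getLastD [] ++ [kv.1]] else st.1 ++ [[kv.1]], 1)
  else st

def compute_kempe_sectors (coloring : List (Int × Int)) (pairing : List Int × List Int) :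
    List (List Int) :=
  let sectors := (coloring.foldl (kempeStepA pairing) ([], -1)).1
  let v0 := pvLookup coloring ((sectors.headD []).headD 0)
  let vl := pvLookup coloring ((sectors.getLastD []).headD 0)
  if (v0 ∈ pairing.1 ∧ vl ∈ pairing.1) ∨ (v0 ∈ pairing.2 ∧ vl ∈ pairing.2) then
    if sectors.headD [] ≠ sectors.getLastD [] then
      (sectors.headD [] ++ sectors.getLastD []) :: sectors.tail.dropLast
    else sectors
  else sectors

-- ===== PORT B =====
-- Source B's lab: pair index of a color (2 stands for Source B's raise, excluded by Pre_)
def pvLab (pairing : List Int × List Int) (v : Int) : Int :=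
  if v ∈ pairing.1 then 0 else if v ∈ pairing.2 then 1 else 2

-- Source B's two-pointer while loops: inner while = takeWhile/dropWhile on the same label
def pvRuns : List (Int × Int) → List (List Int)
  | [] => []
  | (k, l) :: rest =>
      (k :: (rest.takeWhile (fun x => x.2 == l)).map Prod.fst)
        :: pvRuns (rest.dropWhile (fun x => x.2 == l))
  termination_by ps => ps.length
  decreasing_by simpa using Nat.lt_succ_of_le (List.length_dropWhile_le _ _)

def compute_kempe_sectors_alt (coloring : List (Int × Int)) (pairing : List Int × List Int) :
    List (List Int) :=
  let pairs := coloring.map (fun kv => (kv.1, pvLab pairing kv.2))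
  let sectors := pvRuns pairs
  let v0 := pvLookup coloring ((sectors.headD []).headD 0)
  let vl := pvLookup coloring ((sectors.getLastD []).headD 0)
  if (v0 ∈ pairing.1 ∧ vl ∈ pairing.1) ∨ (v0 ∈ pairing.2 ∧ vl ∈ pairing.2) then
    if sectors.headD [] ≠ sectors.getLastD [] then
      (sectors.headD [] ++ sectors.getLastD []) :: sectors.tail.dropLast
    else sectors
  else sectors

-- ===== PRECONDITION & SPEC =====
-- Pre_ excludes: the empty dict (A raises IndexError), a color outside both pair lists
-- (A raises Exception), and association lists with duplicate keys, which do not represent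
-- a Python dict (the dict the Pythons receive would silently drop entries).
def Pre_compute_kempe_sectors (coloring : List (Int × Int)) (pairing : List Int × List Int) : Prop :=
  coloring ≠ [] ∧ (coloring.map Prod.fst).Nodup ∧
    ∀ kv ∈ coloring, kv.2 ∈ pairing.1 ∨ kv.2 ∈ pairing.2
instance (coloring : List (Int × Int)) (pairing : List Int × List Int) :
    Decidable (Pre_compute_kempe_sectors coloring pairing) := by
  unfold Pre_compute_kempe_sectors; infer_instance

def pvWitness_compute_kempe_sectors : (List (Int × Int)) × (List Int × List Int) :=
  ([(1, 5), (2, 6), (3, 5)], ([5], [6]))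

def Spec_compute_kempe_sectors (coloring : List (Int × Int)) (pairing : List Int × List Int) (out : List (List Int)) : Prop := out = compute_kempe_sectors_alt coloring pairing
instance (coloring : List (Int × Int)) (pairing : List Int × List Int) (out : List (List Int)) : Decidable (Spec_compute_kempe_sectors coloring pairing out) := by unfold Spec_compute_kempe_sectors; infer_instance

-- ===== CLAIM (what is proved, stated in full; the proofs are below) =====
def Claim_equal_compute_kempe_sectors : Prop := ∀ (coloring : List (Int × Int)) (pairing : List Int × List Int), Dom_compute_kempe_sectors coloring pairing → Pre_compute_kempe_sectors coloring pairing → Spec_compute_kempe_sectors coloring pairing (compute_kempe_sectors coloring pairing)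

-- ===== LEMMAS AND PROOFS =====

-- A's loop step expressed on a (key, label) pair (proof helper)
def stepL (st : List (List Int) × Int) (kv : Int × Int) : List (List Int) × Int :=
  if kv.2 = 0 then
    (if st.2 = 0 then st.1.dropLast ++ [st.1.getLastD [] ++ [kv.1]] else st.1 ++ [[kv.1]], 0)
  else if kv.2 = 1 then
    (if st.2 = 1 then st.1.dropLast ++ [st.1.getLastD [] ++ [kv.1]] else st.1 ++ [[kv.1]], 1)
  else st

lemma pvRuns_nil : pvRuns [] = [] := by rw [pvRuns]

lemma pvRuns_cons (k l : Int) (rest : List (Int × Int)) :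
    pvRuns ((k, l) :: rest) =
      (k :: (rest.takeWhile (fun x => x.2 == l)).map Prod.fst)
        :: pvRuns (rest.dropWhile (fun x => x.2 == l)) := by
  rw [pvRuns]

lemma stepL_same (sectors : List (List Int)) (run : List Int) (k p : Int)
    (hp : p = 0 ∨ p = 1) :
    stepL (sectors ++ [run], p) (k, p) = (sectors ++ [run ++ [k]], p) := by
  rcases hp with rfl | rfl <;> simp [stepL]

lemma stepL_diff (sectors : List (List Int)) (k p l : Int)
    (hl : l = 0 ∨ l = 1) (hpl : p ≠ l) :
    stepL (sectors, p) (k, l) = (sectors ++ [[k]], l) := by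
  rcases hl with rfl | rfl <;> simp [stepL, hpl]

lemma kempeStepA_eq_stepL (pairing : List Int × List Int) (st : List (List Int) × Int)
    (kv : Int × Int) :
    kempeStepA pairing st kv = stepL st (kv.1, pvLab pairing kv.2) := by
  unfold kempeStepA stepL pvLab
  by_cases h1 : kv.2 ∈ pairing.1 <;> by_cases h2 : kv.2 ∈ pairing.2 <;> simp [h1, h2]

-- the loop invariant: folding A's step from a state whose sectors end in run `run`
-- with previous label `p` extends that run with the leading `p`-labelled keys and
-- then produces exactly B's runs of the remainder
lemma foldA_runs :
    ∀ (ps : List (Int × Int)) (sectors : List (List Int)) (run : List Int) (p : Int),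
    (∀ x ∈ ps, x.2 = 0 ∨ x.2 = 1) →
    (ps.foldl stepL (sectors ++ [run], p)).1
      = sectors ++ (run ++ (ps.takeWhile (fun x => x.2 == p)).map Prod.fst)
          :: pvRuns (ps.dropWhile (fun x => x.2 == p)) := by
  intro ps
  induction ps with
  | nil => intro sectors run p _; simp [pvRuns_nil]
  | cons hd tl ih =>
      intro sectors run p hall
      obtain ⟨k, l⟩ := hd
      have hl : l = 0 ∨ l = 1 := hall (k, l) (by simp)
      have htl : ∀ x ∈ tl, x.2 = 0 ∨ x.2 = 1 := fun x hx => hall x (by simp [hx])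
      rw [List.foldl_cons]
      by_cases hpl : p = l
      · subst hpl
        rw [stepL_same sectors run k p hl, ih sectors (run ++ [k]) p htl]
        simp [List.takeWhile]
      · rw [stepL_diff (sectors ++ [run]) k p l hl hpl,
            ih (sectors ++ [run]) [k] l htl]
        have hne : ((l == p) = false) := by simp [Ne.symm hpl]
        simp [List.takeWhile_cons, hne, pvRuns_cons]

-- A's fold over the coloring is the label-based fold over the (key,label) pairs
lemma foldA_map (pairing : List Int × List Int) (coloring : List (Int × Int))
    (st : List (List Int) × Int) :
    coloring.foldl (kempeStepA pairing) st =
      (coloring.map (fun kv => (kv.1, pvLab pairing kv.2))).foldl stepL st := by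
  induction coloring generalizing st with
  | nil => rfl
  | cons hd tl ih => simp only [List.foldl_cons, List.map_cons, kempeStepA_eq_stepL]; exact ih _

-- the grouping phases agree: A's fold produces B's runs
lemma sectors_eq (coloring : List (Int × Int)) (pairing : List Int × List Int)
    (hne : coloring ≠ [])
    (hcol : ∀ kv ∈ coloring, kv.2 ∈ pairing.1 ∨ kv.2 ∈ pairing.2) :
    (coloring.foldl (kempeStepA pairing) ([], -1)).1 =
      pvRuns (coloring.map (fun kv => (kv.1, pvLab pairing kv.2))) := by
  rw [foldA_map]
  obtain ⟨⟨k, v⟩, tl, rfl⟩ : ∃ hd tl, coloring = hd :: tl := by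
    cases coloring with
    | nil => exact absurd rfl hne
    | cons a b => exact ⟨a, b, rfl⟩
  have hlab : ∀ kv : Int × Int, kv ∈ (k, v) :: tl →
      pvLab pairing kv.2 = 0 ∨ pvLab pairing kv.2 = 1 := by
    intro kv hkv
    unfold pvLab
    by_cases h1 : kv.2 ∈ pairing.1
    · left; simp [h1]
    · rcases hcol kv hkv with h | h
      · exact absurd h h1
      · right; simp [h1, h]
  have hl : pvLab pairing v = 0 ∨ pvLab pairing v = 1 := hlab (k, v) (by simp)
  have hm1 : (-1 : Int) ≠ pvLab pairing v := by rcases hl with h | h <;> rw [h] <;> norm_num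
  rw [List.map_cons, List.foldl_cons,
      stepL_diff [] k (-1) (pvLab pairing v) hl hm1,
      foldA_runs (tl.map (fun kv => (kv.1, pvLab pairing kv.2))) [] [k] (pvLab pairing v)
        (by intro x hx; simp only [List.mem_map] at hx; obtain ⟨kv, hkv, rfl⟩ := hx
            exact hlab kv (by simp [hkv])),
      pvRuns_cons]
  simp

-- ===== VERDICT (by name: the statement is the Claim_ definition above) =====
theorem compute_kempe_sectors_spec : Claim_equal_compute_kempe_sectors := by
  intro coloring pairing _ hpre
  obtain ⟨hne, _, hcol⟩ := hpre
  unfold Spec_compute_kempe_sectors compute_kempe_sectors compute_kempe_sectors_alt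
  rw [sectors_eq coloring pairing hne hcol]
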